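-- pv_equiv track=rewrite | github.com/jittat/admportal | majors/header_utils.py | table_header
-- ===== SOURCE A (Python) =====
-- def extract_line(line):
--     """
--     >>> extract_line("* hello world")
--     ('hello world', 1)
--     >>> extract_line("** this  is a ** test!!")
--     ('this  is a ** test!!', 2)
--     """
--     depth = 0
--     l = len(line)
--     while (depth < l) and (line[depth] == '*'):
--         depth += 1
--     return (line[depth+1:], depth)
--
-- def parse_header(header):
--     """
--     >>> parse_header("* a\\n* b\\n* c")
--     [['a', []], ['b', []], ['c', []]]
--     >>> parse_header("* a\\n** b\\n* c")
--     [['a', [['b', []]]], ['c', []]]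
--     >>> parse_header("* a\\n** b\\n** c\\n*** d\\n* e")
--     [['a', [['b', []], ['c', [['d', []]]]]], ['e', []]]
--     """
--     nodes = []
--     current_nodes = []
--     for line in header.split("\n"):
--         title,depth = extract_line(line.strip())
--         if depth == 0:
--             continue
--         this_node = [title,[]]
--         if depth == 1:
--             nodes.append(this_node)
--             current_nodes = [this_node]
--         else:
--             current_nodes[depth-2][1].append(this_node)
--             current_nodes = current_nodes[:depth-1]
--             current_nodes.append(this_node)
--
--     return nodes
--
-- def table_header(header, prefix_columns=None, postfix_columns=None):
--     nodes = parse_header(header)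
--     rows = {}
--
--     def traverse(node, depth):
--         title = node[0]
--         children = node[1]
--
--         if len(children) == 0:
--             leaf_count = 1
--             is_leaf = True
--         else:
--             leaf_count = 0
--             for child in children:
--                 leaf_count += traverse(child, depth+1)
--             is_leaf = False
--
--         if depth not in rows:
--             rows[depth] = []
--
--         rows[depth].append((title, leaf_count, is_leaf))
--         return leaf_count
--
--
--     for n in nodes:
--         traverse(n,0)
--     output = []
--     row_count = len(rows)
--     for r in range(row_count):
--         output.append('<tr>')
--         if (r == 0) and (prefix_columns):
--             for c in prefix_columns:
--                 output.append('<th rowspan="' + str(row_count) + '">' +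
--                               c + '</th>')
--
--         for title, span, is_leaf in rows[r]:
--             if is_leaf:
--                 rowspan = row_count - r
--                 output.append('<th rowspan="' + str(rowspan) + '">' + title + '</th>')
--             else:
--                 output.append('<th colspan="' + str(span) + '">' + title + '</th>')
--
--         if (r == 0) and (postfix_columns):
--             for c in postfix_columns:
--                 output.append('<th rowspan="' + str(row_count) + '">' +
--                               c + '</th>')
--
--         output.append('</tr>')
--     return "\n".join(output)
-- ===== SOURCE B (Python) =====
-- def table_header(header, prefix_columns=None, postfix_columns=None):
--     # Flat re-implementation: no tree is built.  Each outline line becomes a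
--     # (title, star-depth) item; a node's children are exactly the following
--     # items while their depth stays larger, so leaf-ness and leaf counts are
--     # read off the flat list with a local forward scan.
--     items = []
--     for line in header.split("\n"):
--         s = line.strip()
--         d = 0
--         while d < len(s) and s[d] == '*':
--             d += 1
--         if d > 0:
--             items.append((s[d + 1:], d))
--     if not items:
--         return ""
--     row_count = 0
--     for _, d in items:
--         if d > row_count:
--             row_count = d
--     rows = [[] for _ in range(row_count)]
--     for i, (title, d) in enumerate(items):
--         inside = []
--         for it in items[i + 1:]:
--             if it[1] <= d:
--                 break
--             inside.append(it)
--         if not inside: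
--             rows[d - 1].append((title, 1, True))
--         else:
--             leaves = 0
--             for k, it in enumerate(inside):
--                 if k + 1 == len(inside) or inside[k + 1][1] <= it[1]:
--                     leaves += 1
--             rows[d - 1].append((title, leaves, False))
--     lines = []
--     for r in range(row_count):
--         cells = []
--         if r == 0 and prefix_columns:
--             cells += ['<th rowspan="%d">%s</th>' % (row_count, c) for c in prefix_columns]
--         for title, span, leaf in rows[r]:
--             if leaf:
--                 cells.append('<th rowspan="%d">%s</th>' % (row_count - r, title))
--             else:
--                 cells.append('<th colspan="%d">%s</th>' % (span, title))
--         if r == 0 and postfix_columns: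
--             cells += ['<th rowspan="%d">%s</th>' % (row_count, c) for c in postfix_columns]
--         lines.append("\n".join(["<tr>"] + cells + ["</tr>"]))
--     return "\n".join(lines)
-- ===== Notes on version B (the rewrite author's own statement) =====
-- stated objective: alternative
-- what changed: A builds a nested mutable tree via a rightmost-spine of aliased lists and fills the row buckets by a post-order recursive traversal with a dict; B never builds a tree: it works on the flat (title, star-depth) line list, deciding leaf-ness and counting leaf descendants of each item by a local forward scan of its depth-span, filling positional row buckets in one pass.
import Mathlib
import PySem

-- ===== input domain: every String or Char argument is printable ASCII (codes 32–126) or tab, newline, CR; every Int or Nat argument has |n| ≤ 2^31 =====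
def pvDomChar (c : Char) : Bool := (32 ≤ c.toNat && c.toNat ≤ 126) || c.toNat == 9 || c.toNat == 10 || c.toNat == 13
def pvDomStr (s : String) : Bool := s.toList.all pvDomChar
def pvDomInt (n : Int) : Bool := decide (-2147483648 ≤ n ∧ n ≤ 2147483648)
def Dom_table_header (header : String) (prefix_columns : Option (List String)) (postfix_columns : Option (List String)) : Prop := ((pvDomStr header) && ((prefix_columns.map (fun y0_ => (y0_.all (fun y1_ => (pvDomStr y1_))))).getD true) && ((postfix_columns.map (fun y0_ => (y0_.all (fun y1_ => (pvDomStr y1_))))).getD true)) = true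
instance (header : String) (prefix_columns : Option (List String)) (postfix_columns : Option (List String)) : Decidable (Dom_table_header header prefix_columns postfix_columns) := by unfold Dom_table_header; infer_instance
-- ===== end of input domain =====

-- B rewrites table_header without building A's mutable tree: it reads leaf counts
-- off the flat (title, star-depth) line list by local forward scans (objective: alternative).
-- A cell is Python's tuple (title, leaf_count/colspan, is_leaf); titles are kept as List Char.

-- the while loop of extract_line, shared text of both Pythons: count leading '*'
def countStars : List Char → Nat
  | [] => 0
  | c :: r => if c = '*' then countStars r + 1 else 0

-- ===== PORT A =====

-- extract_line: (line[depth+1:], depth)  (slice from a nonnegative start = drop; exact)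
def extract_line (line : List Char) : List Char × Nat :=
  let depth := countStars line
  (line.drop (depth + 1), depth)

-- Python's nested lists [title, children]; a mutual pair instead of a nested inductive
mutual
inductive PyTree where
  | node : List Char → PyForest → PyTree
inductive PyForest where
  | nil : PyForest
  | cons : PyTree → PyForest → PyForest
end

def forestAppend : PyForest → PyTree → PyForest
  | .nil, t => .cons t .nil
  | .cons h r, t => .cons h (forestAppend r t)

-- Python mutates current_nodes[depth-2][1] through aliasing; current_nodes is exactly the
-- rightmost spine of the forest, so the mutation is modeled exactly by descending k = depth-2
-- rightmost nodes and appending; none = the IndexError current_nodes[depth-2] would raise.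
def insertAt : PyForest → Nat → PyTree → Option PyForest
  | f, 0, t => some (forestAppend f t)
  | .nil, _ + 1, _ => none
  | .cons (.node s c) .nil, k + 1, t =>
      (insertAt c k t).map (fun c' => .cons (.node s c') .nil)
  | .cons h r, k + 1, t => (insertAt r (k + 1) t).map (fun r' => .cons h r')

-- parse_header (none = IndexError)
def parse_header (header : List Char) : Option PyForest :=
  (PySem.Chars.splitOn header ['\n']).foldl (fun acc line =>
    match acc with
    | none => none
    | some nodes =>
      let td := extract_line (PySem.Chars.strip line)
      if td.2 = 0 then some nodes
      else if td.2 = 1 then some (forestAppend nodes (.node td.1 .nil))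
      else insertAt nodes (td.2 - 1) (.node td.1 .nil)) (some .nil)

-- if depth not in rows: rows[depth] = [] ; rows[depth].append(cell)
def rowsAdd (rows : PySem.Dict Nat (List (List Char × Nat × Bool))) (depth : Nat)
    (cell : List Char × Nat × Bool) : PySem.Dict Nat (List (List Char × Nat × Bool)) :=
  let rows1 := if rows.contains depth then rows else rows.insert depth []
  rows1.modify depth [] (fun l => l ++ [cell])

mutual
-- def traverse(node, depth): returns leaf_count, threads the rows dict
def traverse (t : PyTree) (depth : Nat)
    (rows : PySem.Dict Nat (List (List Char × Nat × Bool))) :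
    Nat × PySem.Dict Nat (List (List Char × Nat × Bool)) :=
  match t with
  | .node title children =>
    match children with
    | .nil => (1, rowsAdd rows depth (title, 1, true))
    | c =>
      let lr := traverseF c (depth + 1) rows 0
      (lr.1, rowsAdd lr.2 depth (title, lr.1, false))
-- the "for child in children: leaf_count += traverse(child, depth+1)" loop
def traverseF (f : PyForest) (depth : Nat)
    (rows : PySem.Dict Nat (List (List Char × Nat × Bool))) (acc : Nat) :
    Nat × PySem.Dict Nat (List (List Char × Nat × Bool)) :=
  match f with
  | .nil => (acc, rows)
  | .cons t r =>
    let lr := traverse t depth rows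
    traverseF r depth lr.2 (acc + lr.1)
end

def table_header (header : String) (prefix_columns : Option (List String)) (postfix_columns : Option (List String)) : String :=
  match parse_header header.toList with
  | none => ""   -- Python raises IndexError here; excluded by Pre_table_header
  | some nodes =>
    -- for n in nodes: traverse(n, 0)   (return values discarded)
    let rows := (traverseF nodes 0 PySem.Dict.empty 0).2
    let row_count := rows.size
    let output := (List.range row_count).foldl (fun output r =>
      let output := output ++ ["<tr>".toList]
      let output := if r = 0 && !(prefix_columns.getD []).isEmpty then
          (prefix_columns.getD []).foldl (fun o c =>
            o ++ ["<th rowspan=\"".toList ++ PySem.Int.toChars (row_count : Int) ++ "\">".toList ++ c.toList ++ "</th>".toList]) output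
        else output
      -- rows[r]: the key r is always present (KeyError impossible: depths are contiguous)
      let output := (rows.getD r []).foldl (fun o cell =>
          if cell.2.2 then
            o ++ ["<th rowspan=\"".toList ++ PySem.Int.toChars ((row_count - r : Nat) : Int) ++ "\">".toList ++ cell.1 ++ "</th>".toList]
          else
            o ++ ["<th colspan=\"".toList ++ PySem.Int.toChars (cell.2.1 : Int) ++ "\">".toList ++ cell.1 ++ "</th>".toList]) output
      let output := if r = 0 && !(postfix_columns.getD []).isEmpty then
          (postfix_columns.getD []).foldl (fun o c =>
            o ++ ["<th rowspan=\"".toList ++ PySem.Int.toChars (row_count : Int) ++ "\">".toList ++ c.toList ++ "</th>".toList]) output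
        else output
      output ++ ["</tr>".toList]) []
    String.ofList (PySem.Chars.join ['\n'] output)

-- ===== PORT B =====

-- '<th rowspan="%d">%s</th>' and '<th colspan="%d">%s</th>'
def thR (n : Nat) (title : List Char) : List Char :=
  "<th rowspan=\"".toList ++ PySem.Int.toChars (n : Int) ++ "\">".toList ++ title ++ "</th>".toList
def thC (n : Nat) (title : List Char) : List Char :=
  "<th colspan=\"".toList ++ PySem.Int.toChars (n : Int) ++ "\">".toList ++ title ++ "</th>".toList

-- flat item list: one (title, star-depth) per outline line
def altItems (header : List Char) : List (List Char × Nat) :=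
  (PySem.Chars.splitOn header ['\n']).foldl (fun acc line =>
    let s := PySem.Chars.strip line
    let d := countStars s
    if d > 0 then acc ++ [(s.drop (d + 1), d)] else acc) []

-- the leaves loop: item k is a leaf iff it is last or the next item is not deeper
def countLeaves : List (List Char × Nat) → Nat
  | [] => 0
  | [_] => 1
  | x :: y :: r => (if y.2 ≤ x.2 then 1 else 0) + countLeaves (y :: r)

-- the cell of one item, from the items after it ("inside" = the for/break scan)
def bCell (title : List Char) (d : Nat) (rest : List (List Char × Nat)) :
    List Char × Nat × Bool :=
  let inside := rest.takeWhile (fun it => decide (d < it.2))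
  if inside.isEmpty then (title, 1, true) else (title, countLeaves inside, false)

-- the "for i, (title, d) in enumerate(items)" loop: each item sees the items after it
def bLoop : List (List Char × Nat) → List (List (List Char × Nat × Bool)) →
    List (List (List Char × Nat × Bool))
  | [], rows => rows
  | (title, d) :: rest, rows =>
      bLoop rest (rows.modify (d - 1) (fun b => b ++ [bCell title d rest]))

def table_header_alt (header : String) (prefix_columns : Option (List String)) (postfix_columns : Option (List String)) : String :=
  let items := altItems header.toList
  if items.isEmpty then "" else
  let row_count := items.foldl (fun m it => if m < it.2 then it.2 else m) 0
  let rows := bLoop items (List.replicate row_count [])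
  let lines := (List.range row_count).map (fun r =>
    let cells :=
      (if r = 0 && !(prefix_columns.getD []).isEmpty then
         (prefix_columns.getD []).map (fun c => thR row_count c.toList) else [])
      ++ (rows.getD r []).map (fun cell =>
           if cell.2.2 then thR (row_count - r) cell.1 else thC cell.2.1 cell.1)
      ++ (if r = 0 && !(postfix_columns.getD []).isEmpty then
            (postfix_columns.getD []).map (fun c => thR row_count c.toList) else [])
    PySem.Chars.join ['\n'] ("<tr>".toList :: (cells ++ ["</tr>".toList])))
  String.ofList (PySem.Chars.join ['\n'] lines)

-- ===== PRECONDITION & SPEC =====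

-- Pre_ excludes exactly the headers on which A raises IndexError: an outline line whose
-- star-depth jumps by more than one above the previous line's star-depth.
def lineDepth (line : List Char) : Nat := countStars (PySem.Chars.strip line)

def depthChainOK : Nat → List Nat → Bool
  | _, [] => true
  | prev, d :: rest => decide (d ≤ prev + 1) && depthChainOK d rest

def Pre_table_header (header : String) (prefix_columns : Option (List String)) (postfix_columns : Option (List String)) : Prop :=
  depthChainOK 0 (((PySem.Chars.splitOn header.toList ['\n']).map lineDepth).filter (· ≠ 0)) = true

instance (header : String) (prefix_columns : Option (List String)) (postfix_columns : Option (List String)) : Decidable (Pre_table_header header prefix_columns postfix_columns) := by unfold Pre_table_header; infer_instance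

def pvWitness_table_header : String × Option (List String) × Option (List String) :=
  ("* a\n** b\n** c\n* d", some ["ID"], none)

def Spec_table_header (header : String) (prefix_columns : Option (List String)) (postfix_columns : Option (List String)) (out : String) : Prop := out = table_header_alt header prefix_columns postfix_columns
instance (header : String) (prefix_columns : Option (List String)) (postfix_columns : Option (List String)) (out : String) : Decidable (Spec_table_header header prefix_columns postfix_columns out) := by unfold Spec_table_header; infer_instance

-- ===== CLAIM (what is proved, stated in full; the proofs are below) =====
def Claim_equal_table_header : Prop := ∀ (header : String) (prefix_columns : Option (List String)) (postfix_columns : Option (List String)), Dom_table_header header prefix_columns postfix_columns → Pre_table_header header prefix_columns postfix_columns → Spec_table_header header prefix_columns postfix_columns (table_header header prefix_columns postfix_columns)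


-- ===== LEMMAS AND PROOFS =====

-- flatten of A's tree: the (title, star-depth) items of a subtree, in line order
mutual
def flatT : PyTree → Nat → List (List Char × Nat)
  | .node s c, d => (s, d) :: flatF c (d + 1)
def flatF : PyForest → Nat → List (List Char × Nat)
  | .nil, _ => []
  | .cons t r, d => flatT t d ++ flatF r d
end

mutual
def heightT : PyTree → Nat
  | .node _ c => 1 + heightF c
def heightF : PyForest → Nat
  | .nil => 0
  | .cons t r => max (heightT t) (heightF r)
end

-- length of the rightmost spine (= Python's current_nodes)
mutual
def spineT : PyTree → Nat
  | .node _ c => 1 + spineF c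
def spineF : PyForest → Nat
  | .nil => 0
  | .cons t .nil => spineT t
  | .cons _ (.cons t r) => spineF (.cons t r)
end

-- the cells contributed at star-depth sd by a flat item list (B's per-item rule)
def cellsAt (sd : Nat) : List (List Char × Nat) → List (List Char × Nat × Bool)
  | [] => []
  | (t, d) :: rest => (if d = sd then [bCell t d rest] else []) ++ cellsAt sd rest

mutual
theorem depth_ge_flatT (t : PyTree) (d : Nat) : ∀ x ∈ flatT t d, d ≤ x.2 := by
  cases t with
  | node s c =>
    intro x hx
    simp only [flatT, List.mem_cons] at hx
    rcases hx with h | h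
    · subst h; exact le_refl d
    · have := depth_ge_flatF c (d + 1) x h; omega
theorem depth_ge_flatF (f : PyForest) (d : Nat) : ∀ x ∈ flatF f d, d ≤ x.2 := by
  cases f with
  | nil => intro x hx; simp [flatF] at hx
  | cons t r =>
    intro x hx
    simp only [flatF, List.mem_append] at hx
    rcases hx with h | h
    · exact depth_ge_flatT t d x h
    · exact depth_ge_flatF r d x h
end

theorem flatT_ne_nil (t : PyTree) (d : Nat) : flatT t d ≠ [] := by
  cases t with | node s c => simp [flatT]

theorem flatF_head (f : PyForest) (d : Nat) (h : f ≠ .nil) :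
    ∃ s rest, flatF f d = (s, d) :: rest := by
  cases f with
  | nil => exact absurd rfl h
  | cons t r =>
    cases t with
    | node s c => exact ⟨s, flatF c (d + 1) ++ flatF r d, by simp [flatF, flatT]⟩

theorem flatF_eq_nil_iff (f : PyForest) (d : Nat) : flatF f d = [] ↔ f = .nil := by
  cases f with
  | nil => simp [flatF]
  | cons t r =>
    simp only [flatF, List.append_eq_nil_iff]
    constructor
    · rintro ⟨h1, _⟩; exact absurd h1 (flatT_ne_nil t d)
    · intro h; cases h

theorem takeWhile_gt_nil (ys : List (List Char × Nat)) (k : Nat)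
    (hy : ∀ y ∈ ys.head?, y.2 ≤ k) :
    ys.takeWhile (fun it => decide (k < it.2)) = [] := by
  cases ys with
  | nil => rfl
  | cons y r =>
    simp only [List.head?_cons, Option.mem_some_iff] at hy
    have := hy y rfl
    simp [List.takeWhile_cons, Nat.not_lt.mpr this]

theorem bCell_stop (t : List Char) (d : Nat) (rest ys : List (List Char × Nat))
    (hy : ∀ y ∈ ys.head?, y.2 ≤ d) :
    bCell t d (rest ++ ys) = bCell t d rest := by
  unfold bCell
  rw [List.takeWhile_append]
  split
  · next hlen =>
    have hself : rest.takeWhile (fun it => decide (d < it.2)) = rest :=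
      (List.takeWhile_prefix _).eq_of_length hlen
    rw [takeWhile_gt_nil ys d hy, hself]
    simp
  · rfl

theorem cellsAt_append (sd : Nat) (xs ys : List (List Char × Nat))
    (h : ∀ x ∈ xs, ∀ y ∈ ys.head?, y.2 ≤ x.2) :
    cellsAt sd (xs ++ ys) = cellsAt sd xs ++ cellsAt sd ys := by
  induction xs with
  | nil => simp [cellsAt]
  | cons x rest ih =>
    obtain ⟨t, d⟩ := x
    simp only [List.cons_append, cellsAt]
    rw [bCell_stop t d rest ys (h (t, d) (by simp)), ih (fun x hx => h x (by simp [hx]))]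
    simp

theorem cellsAt_nil_of_lt (sd : Nat) (xs : List (List Char × Nat))
    (h : ∀ x ∈ xs, sd < x.2) : cellsAt sd xs = [] := by
  induction xs with
  | nil => rfl
  | cons x rest ih =>
    obtain ⟨t, d⟩ := x
    have hd : sd < d := h (t, d) (by simp)
    simp only [cellsAt, if_neg (by omega : ¬ d = sd)]
    exact ih (fun x hx => h x (by simp [hx]))

theorem countLeaves_append (xs ys : List (List Char × Nat)) (hys : ys ≠ [])
    (h : ∀ x ∈ xs, ∀ y ∈ ys.head?, y.2 ≤ x.2) :
    countLeaves (xs ++ ys) = countLeaves xs + countLeaves ys := by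
  induction xs with
  | nil => simp [countLeaves]
  | cons x rest ih =>
    cases rest with
    | nil =>
      cases ys with
      | nil => exact absurd rfl hys
      | cons y t =>
        have hy : y.2 ≤ x.2 := by
          have := h x (by simp); simp only [List.head?_cons, Option.mem_some_iff] at this
          exact this y rfl
        simp [countLeaves, if_pos hy]
    | cons x' rest' =>
      have hrec := ih (fun z hz => h z (List.mem_cons_of_mem x hz))
      simp only [List.cons_append] at hrec ⊢
      cases x; cases x'
      simp only [countLeaves, List.cons_append] at hrec ⊢
      omega

theorem rowsAdd_getD (rows : PySem.Dict Nat (List (List Char × Nat × Bool))) (k : Nat)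
    (c : List Char × Nat × Bool) (r : Nat) :
    (rowsAdd rows k c).getD r [] =
      if r = k then rows.getD k [] ++ [c] else rows.getD r [] := by
  unfold rowsAdd
  by_cases hc : rows.contains k = true
  · simp only [hc, if_true]
    rw [PySem.Dict.getD_modify]
  · have hc' : rows.contains k = false := by simpa using hc
    simp only [hc', Bool.false_eq_true, if_false]
    rw [PySem.Dict.getD_modify]
    by_cases hr : r = k
    · simp [hr, PySem.Dict.getD_insert, PySem.Dict.getD_of_not_contains rows _ hc']
    · simp [hr, PySem.Dict.getD_insert]

theorem rowsAdd_nodup (rows : PySem.Dict Nat (List (List Char × Nat × Bool))) (k : Nat)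
    (c : List Char × Nat × Bool) (h : rows.keys.Nodup) : (rowsAdd rows k c).keys.Nodup := by
  unfold rowsAdd
  by_cases hc : rows.contains k = true
  · simp only [hc, if_true]
    rw [PySem.Dict.keys_modify]
    exact PySem.Dict.nodup_keys_insert _ _ _ h
  · have hc' : rows.contains k = false := by simpa using hc
    simp only [hc', Bool.false_eq_true, if_false]
    rw [PySem.Dict.keys_modify]
    exact PySem.Dict.nodup_keys_insert _ _ _ (PySem.Dict.nodup_keys_insert _ _ _ h)

theorem rowsAdd_keys (rows : PySem.Dict Nat (List (List Char × Nat × Bool))) (k : Nat)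
    (c : List Char × Nat × Bool) :
    (rowsAdd rows k c).keys.toFinset = insert k rows.keys.toFinset := by
  unfold rowsAdd
  by_cases hc : rows.contains k = true
  · simp only [hc, if_true]
    rw [PySem.Dict.keys_modify, PySem.Dict.keys_insert_of_contains _ _ hc]
    have hk : k ∈ rows.keys := (PySem.Dict.contains_iff_mem_keys rows k).mp hc
    rw [Finset.insert_eq_self.mpr (List.mem_toFinset.mpr hk)]
  · have hc' : rows.contains k = false := by simpa using hc
    simp only [hc', Bool.false_eq_true, if_false]
    rw [PySem.Dict.keys_modify,
      PySem.Dict.keys_insert_of_contains _ _ (PySem.Dict.contains_insert_self rows k []),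
      PySem.Dict.keys_insert_of_not_contains rows _ hc']
    ext x
    simp [or_comm]

mutual
theorem traverse_spec (t : PyTree) (d : Nat)
    (rows : PySem.Dict Nat (List (List Char × Nat × Bool))) (h : rows.keys.Nodup) :
    (traverse t d rows).1 = countLeaves (flatT t (d + 1))
    ∧ (∀ r, (traverse t d rows).2.getD r [] =
        rows.getD r [] ++ cellsAt (r + 1) (flatT t (d + 1)))
    ∧ (traverse t d rows).2.keys.Nodup
    ∧ (traverse t d rows).2.keys.toFinset =
        rows.keys.toFinset ∪ Finset.Ico d (d + heightT t) := by
  cases t with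
  | node title children =>
    cases children with
    | nil =>
      have he : _root_.traverse (PyTree.node title PyForest.nil) d rows =
          (1, rowsAdd rows d (title, 1, true)) := rfl
      have hfl : flatT (PyTree.node title PyForest.nil) (d + 1) = [(title, d + 1)] := rfl
      rw [he, hfl]
      refine ⟨by simp [countLeaves], ?_, rowsAdd_nodup _ _ _ h, ?_⟩
      · intro r
        rw [rowsAdd_getD]
        by_cases hr : r = d
        · subst hr
          simp [cellsAt, bCell]
        · rw [if_neg hr]
          have hcnil : cellsAt (r + 1) [(title, d + 1)] = [] := by
            simp only [cellsAt]
            rw [if_neg (by omega : ¬ d + 1 = r + 1)]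
            simp
          rw [hcnil, List.append_nil]
      · rw [rowsAdd_keys]
        rw [show d + heightT (PyTree.node title PyForest.nil) = d + 1 from rfl]
        ext x
        simp only [Finset.mem_insert, Finset.mem_union, Finset.mem_Ico]
        rw [show (d ≤ x ∧ x < d + 1) ↔ x = d from by omega]
        tauto
    | cons ct cr =>
      have he : _root_.traverse (PyTree.node title (PyForest.cons ct cr)) d rows =
          ((traverseF (PyForest.cons ct cr) (d + 1) rows 0).1,
           rowsAdd (traverseF (PyForest.cons ct cr) (d + 1) rows 0).2 d
             (title, (traverseF (PyForest.cons ct cr) (d + 1) rows 0).1, false)) := rfl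
      have hfl : flatT (PyTree.node title (PyForest.cons ct cr)) (d + 1) =
          (title, d + 1) :: flatF (PyForest.cons ct cr) (d + 2) := rfl
      obtain ⟨h1, h2, h3, h4⟩ := traverseF_spec (PyForest.cons ct cr) (d + 1) rows 0 h
      have hne : flatF (PyForest.cons ct cr) (d + 2) ≠ [] := by
        rw [Ne, flatF_eq_nil_iff]; intro hcontra; cases hcontra
      obtain ⟨s', rest', hhead⟩ := flatF_head (PyForest.cons ct cr) (d + 2) (by intro hh; cases hh)
      have hge := depth_ge_flatF (PyForest.cons ct cr) (d + 2)
      have h1' : (traverseF (PyForest.cons ct cr) (d + 1) rows 0).1 =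
          countLeaves (flatF (PyForest.cons ct cr) (d + 2)) := by
        rw [h1]; norm_num [show d + 1 + 1 = d + 2 from rfl]
      have hcl : countLeaves ((title, d + 1) :: flatF (PyForest.cons ct cr) (d + 2)) =
          countLeaves (flatF (PyForest.cons ct cr) (d + 2)) := by
        rw [hhead]
        simp [countLeaves, if_neg (by omega : ¬ d + 2 ≤ d + 1)]
      have hinside : (flatF (PyForest.cons ct cr) (d + 2)).takeWhile
          (fun it => decide (d + 1 < it.2)) = flatF (PyForest.cons ct cr) (d + 2) := by
        rw [List.takeWhile_eq_self_iff]
        intro x hx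
        simp only [decide_eq_true_eq]
        have := hge x hx; omega
      have hcell : bCell title (d + 1) (flatF (PyForest.cons ct cr) (d + 2)) =
          (title, (traverseF (PyForest.cons ct cr) (d + 1) rows 0).1, false) := by
        unfold bCell
        simp only [hinside]
        rw [if_neg (by simpa [List.isEmpty_iff] using hne)]
        rw [h1']
      rw [he, hfl]
      refine ⟨by rw [hcl, h1'], ?_, rowsAdd_nodup _ _ _ h3, ?_⟩
      · intro r
        rw [rowsAdd_getD]
        by_cases hr : r = d
        · rw [hr, if_pos rfl]
          rw [h2 d]
          have hnil : cellsAt (d + 1) (flatF (PyForest.cons ct cr) (d + 1 + 1)) = [] :=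
            cellsAt_nil_of_lt (d + 1) _ (fun x hx => by
              have := hge x (by simpa [show d + 1 + 1 = d + 2 from rfl] using hx); omega)
          rw [hnil, List.append_nil]
          show _ = _ ++ cellsAt (d + 1) ((title, d + 1) :: flatF (PyForest.cons ct cr) (d + 2))
          simp only [cellsAt, if_pos rfl]
          rw [hcell]
          rw [show d + 1 + 1 = d + 2 from rfl] at hnil
          rw [hnil]
          simp
        · rw [if_neg hr, h2 r]
          show _ ++ cellsAt (r + 1) (flatF (PyForest.cons ct cr) (d + 2)) =
            _ ++ cellsAt (r + 1) ((title, d + 1) :: flatF (PyForest.cons ct cr) (d + 2))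
          simp only [cellsAt]
          rw [if_neg (by omega : ¬ d + 1 = r + 1)]
          simp
      · rw [rowsAdd_keys, h4]
        rw [show d + heightT (PyTree.node title (PyForest.cons ct cr)) =
              d + (1 + heightF (PyForest.cons ct cr)) from rfl]
        ext x
        simp only [Finset.mem_insert, Finset.mem_union, Finset.mem_Ico]
        rw [show (d ≤ x ∧ x < d + (1 + heightF (PyForest.cons ct cr))) ↔
              (x = d ∨ (d + 1 ≤ x ∧ x < d + 1 + heightF (PyForest.cons ct cr))) from by omega]
        tauto
theorem traverseF_spec (f : PyForest) (d : Nat)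
    (rows : PySem.Dict Nat (List (List Char × Nat × Bool))) (acc : Nat) (h : rows.keys.Nodup) :
    (traverseF f d rows acc).1 = acc + countLeaves (flatF f (d + 1))
    ∧ (∀ r, (traverseF f d rows acc).2.getD r [] =
        rows.getD r [] ++ cellsAt (r + 1) (flatF f (d + 1)))
    ∧ (traverseF f d rows acc).2.keys.Nodup
    ∧ (traverseF f d rows acc).2.keys.toFinset =
        rows.keys.toFinset ∪ Finset.Ico d (d + heightF f) := by
  cases f with
  | nil =>
    refine ⟨by simp [traverseF, flatF, countLeaves], fun r => by simp [traverseF, flatF, cellsAt],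
      by simpa [traverseF] using h, ?_⟩
    rw [show traverseF PyForest.nil d rows acc = (acc, rows) from rfl,
      show d + heightF PyForest.nil = d from rfl]
    simp
  | cons t r =>
    have he : traverseF (PyForest.cons t r) d rows acc =
        traverseF r d (_root_.traverse t d rows).2 (acc + (_root_.traverse t d rows).1) := rfl
    have hfl : flatF (PyForest.cons t r) (d + 1) = flatT t (d + 1) ++ flatF r (d + 1) := rfl
    obtain ⟨t1, t2, t3, t4⟩ := traverse_spec t d rows h
    obtain ⟨r1, r2, r3, r4⟩ := traverseF_spec r d (_root_.traverse t d rows).2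
      (acc + (_root_.traverse t d rows).1) t3
    have hxge := depth_ge_flatT t (d + 1)
    have hcond : ∀ x ∈ flatT t (d + 1), ∀ y ∈ (flatF r (d + 1)).head?, y.2 ≤ x.2 := by
      intro x hx y hy
      cases r with
      | nil => simp [flatF] at hy
      | cons rt rr =>
        obtain ⟨s', rest', hh⟩ := flatF_head (PyForest.cons rt rr) (d + 1) (by intro hh; cases hh)
        rw [hh] at hy
        simp only [List.head?_cons, Option.mem_some_iff] at hy
        subst hy
        exact hxge x hx
    have hcls : countLeaves (flatT t (d + 1) ++ flatF r (d + 1)) =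
        countLeaves (flatT t (d + 1)) + countLeaves (flatF r (d + 1)) := by
      cases r with
      | nil => simp [flatF, countLeaves]
      | cons rt rr =>
        exact countLeaves_append _ _ (by rw [Ne, flatF_eq_nil_iff]; intro hh; cases hh) hcond
    rw [he, hfl]
    refine ⟨?_, ?_, r3, ?_⟩
    · rw [r1, hcls, t1]
      omega
    · intro rr
      rw [r2 rr, t2 rr, cellsAt_append _ _ _ hcond]
      simp
    · rw [r4, t4]
      rw [show d + heightF (PyForest.cons t r) = d + max (heightT t) (heightF r) from rfl]
      ext x
      simp only [Finset.mem_union, Finset.mem_Ico]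
      rw [show (d ≤ x ∧ x < d + max (heightT t) (heightF r)) ↔
            ((d ≤ x ∧ x < d + heightT t) ∨ (d ≤ x ∧ x < d + heightF r)) from by omega]
      tauto
end

theorem bLoop_getD (items : List (List Char × Nat))
    (rows : List (List (List Char × Nat × Bool))) (r : Nat)
    (hr : r < rows.length) (hd : ∀ it ∈ items, 1 ≤ it.2) :
    (bLoop items rows).getD r [] = rows.getD r [] ++ cellsAt (r + 1) items := by
  induction items generalizing rows with
  | nil => simp [bLoop, cellsAt]
  | cons x rest ih =>
    obtain ⟨title, dd⟩ := x
    have hdd : 1 ≤ dd := hd (title, dd) (by simp)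
    rw [show bLoop ((title, dd) :: rest) rows =
        bLoop rest (rows.modify (dd - 1) (fun b => b ++ [bCell title dd rest])) from rfl]
    rw [ih _ (by rw [List.length_modify]; exact hr) (fun it hit => hd it (by simp [hit]))]
    have hmod : (rows.modify (dd - 1) (fun b => b ++ [bCell title dd rest])).getD r [] =
        if dd - 1 = r then rows.getD r [] ++ [bCell title dd rest] else rows.getD r [] := by
      rw [List.getD_eq_getElem?_getD, List.getD_eq_getElem?_getD, List.getElem?_modify,
        List.getElem?_eq_getElem hr]
      by_cases h : dd - 1 = r <;> simp [h]
    rw [hmod]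
    by_cases hcase : dd = r + 1
    · rw [if_pos (by omega)]
      show _ = _ ++ cellsAt (r + 1) ((title, dd) :: rest)
      simp only [cellsAt, if_pos hcase]
      simp
    · rw [if_neg (by omega)]
      show _ = _ ++ cellsAt (r + 1) ((title, dd) :: rest)
      simp only [cellsAt, if_neg hcase]
      simp

-- the shared line step, named for induction
def altStep (acc : List (List Char × Nat)) (line : List Char) : List (List Char × Nat) :=
  let s := PySem.Chars.strip line
  let d := countStars s
  if d > 0 then acc ++ [(s.drop (d + 1), d)] else acc

def itemsOf (lines : List (List Char)) : List (List Char × Nat) :=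
  lines.foldl altStep []

theorem altItems_eq (header : List Char) :
    altItems header = itemsOf (PySem.Chars.splitOn header ['\n']) := rfl

theorem itemsOf_cons (l : List Char) (ls : List (List Char)) :
    itemsOf (l :: ls) =
      (if 0 < lineDepth l then
        [((PySem.Chars.strip l).drop (lineDepth l + 1), lineDepth l)] else []) ++ itemsOf ls := by
  have hstep : ∀ (acc : List (List Char × Nat)) (l : List Char),
      altStep acc l = acc ++ altStep [] l := by
    intro acc l
    unfold altStep
    by_cases h0 : 0 < countStars (PySem.Chars.strip l) <;> simp [h0]
  have hacc : ∀ (ls : List (List Char)) (acc : List (List Char × Nat)),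
      ls.foldl altStep acc = acc ++ ls.foldl altStep [] := by
    intro ls
    induction ls with
    | nil => simp
    | cons l ls ih =>
      intro acc
      rw [List.foldl_cons, List.foldl_cons, ih (altStep acc l), ih (altStep [] l),
        hstep acc l, List.append_assoc]
  show (l :: ls).foldl altStep [] = _
  rw [List.foldl_cons, hacc ls (altStep [] l)]
  congr 1

theorem itemsOf_pos (ls : List (List Char)) : ∀ it ∈ itemsOf ls, 1 ≤ it.2 := by
  induction ls with
  | nil => intro it hit; simp [itemsOf] at hit
  | cons l ls ih =>
    intro it hit
    rw [itemsOf_cons] at hit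
    rcases List.mem_append.mp hit with h | h
    · by_cases h0 : 0 < lineDepth l
      · simp [h0] at h; subst h; simpa using h0
      · simp [h0] at h
    · exact ih it h

-- A's parse loop step, named for induction
def aStep (acc : Option PyForest) (line : List Char) : Option PyForest :=
  match acc with
  | none => none
  | some nodes =>
    let td := extract_line (PySem.Chars.strip line)
    if td.2 = 0 then some nodes
    else if td.2 = 1 then some (forestAppend nodes (.node td.1 .nil))
    else insertAt nodes (td.2 - 1) (.node td.1 .nil)

theorem parse_header_eq (header : List Char) :
    parse_header header = (PySem.Chars.splitOn header ['\n']).foldl aStep (some .nil) := rfl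

theorem forestAppend_flat (f : PyForest) (t : PyTree) (d : Nat) :
    flatF (forestAppend f t) d = flatF f d ++ flatT t d := by
  cases f with
  | nil =>
    show flatT t d ++ flatF .nil d = flatF .nil d ++ flatT t d
    rw [show flatF PyForest.nil d = [] from rfl]
    simp
  | cons h r =>
    show flatT h d ++ flatF (forestAppend r t) d = (flatT h d ++ flatF r d) ++ flatT t d
    rw [forestAppend_flat r t d, List.append_assoc]

theorem forestAppend_spine (f : PyForest) (s : List Char) :
    spineF (forestAppend f (.node s .nil)) = 1 := by
  cases f with
  | nil => rfl
  | cons h r =>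
    cases r with
    | nil => rfl
    | cons h2 r2 =>
      show spineF (forestAppend (PyForest.cons h2 r2) (.node s .nil)) = 1
      exact forestAppend_spine (PyForest.cons h2 r2) s

theorem insertAt_spec (f : PyForest) (k : Nat) (s : List Char) (hk : k ≤ spineF f) :
    ∃ f', insertAt f k (.node s .nil) = some f' ∧ spineF f' = k + 1
      ∧ ∀ d, flatF f' d = flatF f d ++ [(s, d + k)] := by
  cases k with
  | zero =>
    refine ⟨forestAppend f (.node s .nil), by simp [insertAt], forestAppend_spine f s, fun d => ?_⟩
    rw [forestAppend_flat, show flatT (.node s .nil) d = [(s, d)] from rfl]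
    simp
  | succ k' =>
    cases f with
    | nil =>
      rw [show spineF PyForest.nil = 0 from rfl] at hk
      omega
    | cons h r =>
      cases r with
      | nil =>
        cases h with
        | node s0 c =>
          have hk' : k' ≤ spineF c := by
            have hs : spineF (PyForest.cons (.node s0 c) .nil) = 1 + spineF c := rfl
            omega
          obtain ⟨c', hc1, hc2, hc3⟩ := insertAt_spec c k' s hk'
          refine ⟨.cons (.node s0 c') .nil, ?_, ?_, fun d => ?_⟩
          · rw [show insertAt (PyForest.cons (.node s0 c) .nil) (k' + 1) (.node s .nil) =
                (insertAt c k' (.node s .nil)).map (fun c' => .cons (.node s0 c') .nil) from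
                by simp [insertAt], hc1]
            rfl
          · rw [show spineF (PyForest.cons (.node s0 c') .nil) = 1 + spineF c' from rfl, hc2]
            omega
          · rw [show flatF (PyForest.cons (.node s0 c') .nil) d =
                ((s0, d) :: flatF c' (d + 1)) ++ [] from rfl,
              show flatF (PyForest.cons (.node s0 c) .nil) d =
                ((s0, d) :: flatF c (d + 1)) ++ [] from rfl,
              hc3 (d + 1), show d + 1 + k' = d + (k' + 1) from by omega]
            simp
      | cons h2 r2 =>
        have hk2 : k' + 1 ≤ spineF (PyForest.cons h2 r2) := by
          have hs : spineF (PyForest.cons h (PyForest.cons h2 r2)) =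
              spineF (PyForest.cons h2 r2) := rfl
          omega
        obtain ⟨r', h1, h2', h3⟩ := insertAt_spec (PyForest.cons h2 r2) (k' + 1) s hk2
        refine ⟨.cons h r', ?_, ?_, fun d => ?_⟩
        · rw [show insertAt (PyForest.cons h (PyForest.cons h2 r2)) (k' + 1) (.node s .nil) =
              (insertAt (PyForest.cons h2 r2) (k' + 1) (.node s .nil)).map
                (fun r' => .cons h r') from by simp [insertAt], h1]
          rfl
        · cases r' with
          | nil =>
            exfalso
            have := h3 0
            rw [show flatF PyForest.nil 0 = [] from rfl] at this
            exact absurd this.symm (by simp)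
          | cons a b =>
            rw [show spineF (PyForest.cons h (PyForest.cons a b)) =
                spineF (PyForest.cons a b) from rfl]
            exact h2'
        · rw [show flatF (PyForest.cons h r') d = flatT h d ++ flatF r' d from rfl,
            show flatF (PyForest.cons h (PyForest.cons h2 r2)) d =
              flatT h d ++ flatF (PyForest.cons h2 r2) d from rfl,
            h3 d, List.append_assoc]

theorem parse_chain (ls : List (List Char)) : ∀ (F : PyForest),
    depthChainOK (spineF F) ((ls.map lineDepth).filter (fun d => decide (d ≠ 0))) = true →
    ∃ F', ls.foldl aStep (some F) = some F'
      ∧ flatF F' 1 = flatF F 1 ++ itemsOf ls := by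
  induction ls with
  | nil => exact fun F _ => ⟨F, rfl, by simp [itemsOf]⟩
  | cons l ls ih =>
    intro F hchain
    by_cases h0 : lineDepth l = 0
    · have hstep : aStep (some F) l = some F := by
        unfold aStep extract_line
        unfold lineDepth at h0
        simp [h0]
      rw [List.foldl_cons, hstep]
      have hchain' : depthChainOK (spineF F)
          ((ls.map lineDepth).filter (fun d => decide (d ≠ 0))) = true := by
        simpa [List.filter_cons, h0] using hchain
      obtain ⟨F', hf1, hf2⟩ := ih F hchain'
      refine ⟨F', hf1, ?_⟩
      rw [hf2, itemsOf_cons]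
      simp [show ¬ 0 < lineDepth l from by omega]
    · have hd1 : 1 ≤ lineDepth l := by omega
      have hfil : ((l :: ls).map lineDepth).filter (fun d => decide (d ≠ 0)) =
          lineDepth l :: (ls.map lineDepth).filter (fun d => decide (d ≠ 0)) := by
        simp [List.filter_cons, h0]
      rw [hfil] at hchain
      simp only [depthChainOK, Bool.and_eq_true, decide_eq_true_eq] at hchain
      obtain ⟨hle, hrest⟩ := hchain
      by_cases hd : lineDepth l = 1
      · have hstep : aStep (some F) l =
            some (forestAppend F (.node ((PySem.Chars.strip l).drop (lineDepth l + 1)) .nil)) := by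
          unfold aStep extract_line
          unfold lineDepth at hd ⊢
          simp [hd]
        rw [List.foldl_cons, hstep]
        obtain ⟨F', hf1, hf2⟩ :=
          ih (forestAppend F (.node ((PySem.Chars.strip l).drop (lineDepth l + 1)) .nil))
            (by rwa [forestAppend_spine, ← hd])
        refine ⟨F', hf1, ?_⟩
        rw [hf2, forestAppend_flat, itemsOf_cons, if_pos (by omega)]
        rw [show flatT (.node ((PySem.Chars.strip l).drop (lineDepth l + 1)) .nil) 1 =
            [(((PySem.Chars.strip l).drop (lineDepth l + 1)), 1)] from rfl]
        rw [hd]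
        simp
      · have hk : lineDepth l - 1 ≤ spineF F := by omega
        obtain ⟨F1, hi1, hi2, hi3⟩ :=
          insertAt_spec F (lineDepth l - 1) ((PySem.Chars.strip l).drop (lineDepth l + 1)) hk
        have hstep : aStep (some F) l =
            insertAt F (lineDepth l - 1) (.node ((PySem.Chars.strip l).drop (lineDepth l + 1)) .nil) := by
          unfold aStep extract_line
          unfold lineDepth at h0 hd ⊢
          simp [h0, hd]
        rw [List.foldl_cons, hstep, hi1]
        obtain ⟨F', hf1, hf2⟩ := ih F1 (by rw [hi2, show lineDepth l - 1 + 1 = lineDepth l from by omega]; exact hrest)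
        refine ⟨F', hf1, ?_⟩
        rw [hf2, hi3 1, itemsOf_cons, if_pos (by omega),
          show 1 + (lineDepth l - 1) = lineDepth l from by omega]
        simp

theorem heightT_pos (t : PyTree) : 1 ≤ heightT t := by
  cases t with
  | node s c => rw [show heightT (.node s c) = 1 + heightF c from rfl]; omega

theorem heightF_pos (f : PyForest) (h : f ≠ .nil) : 1 ≤ heightF f := by
  cases f with
  | nil => exact absurd rfl h
  | cons t r =>
    rw [show heightF (.cons t r) = max (heightT t) (heightF r) from rfl]
    have := heightT_pos t
    omega

-- row_count agreement: B's running maximum over the flat items vs A's tree height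
mutual
theorem mf_flatT (t : PyTree) (d : Nat) (a : Nat) (hd : 1 ≤ d) :
    (flatT t d).foldl (fun m it => if m < it.2 then it.2 else m) a =
      max a (d + heightT t - 1) := by
  cases t with
  | node s c =>
    rw [show flatT (.node s c) d = (s, d) :: flatF c (d + 1) from rfl, List.foldl_cons]
    have hstep : (if a < (s, d).2 then (s, d).2 else a) = max a d := by
      simp only; split <;> omega
    rw [hstep]
    cases c with
    | nil =>
      rw [show flatF PyForest.nil (d + 1) = [] from rfl, List.foldl_nil,
        show heightT (PyTree.node s PyForest.nil) = 1 from rfl]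
      omega
    | cons ct cr =>
      rw [mf_flatF (PyForest.cons ct cr) (d + 1) (max a d) (by omega) (by intro hh; cases hh),
        show heightT (PyTree.node s (PyForest.cons ct cr)) =
          1 + heightF (PyForest.cons ct cr) from rfl]
      have hpos : 1 ≤ heightF (PyForest.cons ct cr) := heightF_pos (PyForest.cons ct cr) (by intro hh; cases hh)
      omega
theorem mf_flatF (f : PyForest) (d : Nat) (a : Nat) (hd : 1 ≤ d) (h : f ≠ .nil) :
    (flatF f d).foldl (fun m it => if m < it.2 then it.2 else m) a =
      max a (d + heightF f - 1) := by
  cases f with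
  | nil => exact absurd rfl h
  | cons t r =>
    rw [show flatF (PyForest.cons t r) d = flatT t d ++ flatF r d from rfl, List.foldl_append,
      mf_flatT t d a hd]
    cases r with
    | nil =>
      rw [show flatF PyForest.nil d = [] from rfl, List.foldl_nil,
        show heightF (PyForest.cons t PyForest.nil) = max (heightT t) 0 from rfl]
      have := heightT_pos t
      omega
    | cons rt rr =>
      rw [mf_flatF (PyForest.cons rt rr) d _ hd (by intro hh; cases hh),
        show heightF (PyForest.cons t (PyForest.cons rt rr)) =
          max (heightT t) (heightF (PyForest.cons rt rr)) from rfl]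
      have h1 := heightT_pos t
      have h2 := heightF_pos (PyForest.cons rt rr) (by intro hh; cases hh)
      omega
end

theorem join_append (sep : List Char) (xs ys : List (List Char)) (hxs : xs ≠ []) (hys : ys ≠ []) :
    PySem.Chars.join sep (xs ++ ys) =
      PySem.Chars.join sep xs ++ sep ++ PySem.Chars.join sep ys := by
  induction xs with
  | nil => exact absurd rfl hxs
  | cons x rest ih =>
    cases rest with
    | nil =>
      cases ys with
      | nil => exact absurd rfl hys
      | cons y t =>
        rw [List.singleton_append, PySem.Chars.join_cons_cons, PySem.Chars.join_singleton]
    | cons x2 rest2 =>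
      have hih := ih (by simp)
      rw [List.cons_append, List.cons_append, PySem.Chars.join_cons_cons,
        show x2 :: (rest2 ++ ys) = (x2 :: rest2) ++ ys from rfl, hih,
        PySem.Chars.join_cons_cons]
      simp [List.append_assoc]

theorem join_flatten (sep : List Char) (gs : List (List (List Char))) (h : ∀ g ∈ gs, g ≠ []) :
    PySem.Chars.join sep (gs.map (PySem.Chars.join sep)) = PySem.Chars.join sep gs.flatten := by
  induction gs with
  | nil => rfl
  | cons g rest ih =>
    cases rest with
    | nil => simp [PySem.Chars.join_singleton]
    | cons g2 r2 =>
      have hflat : (g2 :: r2).flatten ≠ [] := by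
        have hg2 : g2 ≠ [] := h g2 (by simp)
        rw [List.flatten_cons]
        intro hcontra
        exact hg2 (List.append_eq_nil_iff.mp hcontra).1
      rw [List.map_cons, List.map_cons, PySem.Chars.join_cons_cons, List.flatten_cons,
        join_append sep g (g2 :: r2).flatten (h g (by simp)) hflat]
      rw [← List.map_cons]
      rw [ih (fun g' hg' => h g' (List.mem_cons_of_mem g hg'))]

theorem flatten_map_singleton {α β : Type} (l : List α) (f : α → β) :
    (List.map (fun x => [f x]) l).flatten = List.map f l := by
  induction l with
  | nil => rfl
  | cons x xs ih => simp [ih]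

-- one row of the output table, from the cells at star-depth r+1
def rowGroup (rc : Nat) (prefix_columns postfix_columns : Option (List String))
    (cells : List (List Char × Nat × Bool)) (r : Nat) : List (List Char) :=
  "<tr>".toList ::
    ((if r = 0 && !(prefix_columns.getD []).isEmpty then
        (prefix_columns.getD []).map (fun c => thR rc c.toList) else [])
     ++ cells.map (fun cell => if cell.2.2 then thR (rc - r) cell.1 else thC cell.2.1 cell.1)
     ++ (if r = 0 && !(postfix_columns.getD []).isEmpty then
          (postfix_columns.getD []).map (fun c => thR rc c.toList) else [])
     ++ ["</tr>".toList])

theorem foldl_body_eq (rc : Nat) (prefix_columns postfix_columns : Option (List String))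
    (rows : PySem.Dict Nat (List (List Char × Nat × Bool))) :
    (fun (output : List (List Char)) (r : Nat) =>
      let output1 := output ++ ["<tr>".toList]
      let output2 := if r = 0 && !(prefix_columns.getD []).isEmpty then
          (prefix_columns.getD []).foldl (fun o c =>
            o ++ ["<th rowspan=\"".toList ++ PySem.Int.toChars (rc : Int) ++ "\">".toList ++ c.toList ++ "</th>".toList]) output1
        else output1
      let output3 := (rows.getD r []).foldl (fun o cell =>
          if cell.2.2 then
            o ++ ["<th rowspan=\"".toList ++ PySem.Int.toChars ((rc - r : Nat) : Int) ++ "\">".toList ++ cell.1 ++ "</th>".toList]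
          else
            o ++ ["<th colspan=\"".toList ++ PySem.Int.toChars (cell.2.1 : Int) ++ "\">".toList ++ cell.1 ++ "</th>".toList]) output2
      let output4 := if r = 0 && !(postfix_columns.getD []).isEmpty then
          (postfix_columns.getD []).foldl (fun o c =>
            o ++ ["<th rowspan=\"".toList ++ PySem.Int.toChars (rc : Int) ++ "\">".toList ++ c.toList ++ "</th>".toList]) output3
        else output3
      output4 ++ ["</tr>".toList]) =
    fun (output : List (List Char)) (r : Nat) =>
      output ++ rowGroup rc prefix_columns postfix_columns (rows.getD r []) r := by
  funext output r
  simp only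
  have hcells : ∀ (o : List (List Char)),
      (rows.getD r []).foldl (fun o cell =>
          if cell.2.2 then
            o ++ ["<th rowspan=\"".toList ++ PySem.Int.toChars ((rc - r : Nat) : Int) ++ "\">".toList ++ cell.1 ++ "</th>".toList]
          else
            o ++ ["<th colspan=\"".toList ++ PySem.Int.toChars (cell.2.1 : Int) ++ "\">".toList ++ cell.1 ++ "</th>".toList]) o =
        o ++ (rows.getD r []).map (fun cell =>
          if cell.2.2 then thR (rc - r) cell.1 else thC cell.2.1 cell.1) := by
    intro o
    have hfun : (fun (o : List (List Char)) (cell : List Char × Nat × Bool) =>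
        if cell.2.2 then
          o ++ ["<th rowspan=\"".toList ++ PySem.Int.toChars ((rc - r : Nat) : Int) ++ "\">".toList ++ cell.1 ++ "</th>".toList]
        else
          o ++ ["<th colspan=\"".toList ++ PySem.Int.toChars (cell.2.1 : Int) ++ "\">".toList ++ cell.1 ++ "</th>".toList]) =
        fun o cell =>
          o ++ [if cell.2.2 then thR (rc - r) cell.1 else thC cell.2.1 cell.1] := by
      funext o cell
      by_cases hc : cell.2.2 <;> simp [hc, thR, thC]
    rw [hfun, PySem.List.foldl_append_singleton_eq_map]
  rw [hcells]
  rw [show (fun (o : List (List Char)) (c : String) =>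
      o ++ ["<th rowspan=\"".toList ++ PySem.Int.toChars (rc : Int) ++ "\">".toList ++ c.toList ++ "</th>".toList]) =
      fun o c => o ++ [thR rc c.toList] from rfl]
  by_cases hp : r = 0 && !(prefix_columns.getD []).isEmpty <;>
    by_cases hq : r = 0 && !(postfix_columns.getD []).isEmpty <;>
      simp [hp, hq, PySem.List.foldl_append_singleton_eq_map, rowGroup, List.append_assoc,
        flatten_map_singleton]

theorem table_header_agree (header : String) (prefix_columns : Option (List String)) (postfix_columns : Option (List String))
    (hpre : Pre_table_header header prefix_columns postfix_columns) :
    table_header header prefix_columns postfix_columns = table_header_alt header prefix_columns postfix_columns := by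
  unfold Pre_table_header at hpre
  obtain ⟨F, hfold, hflat⟩ := parse_chain (PySem.Chars.splitOn header.toList ['\n']) PyForest.nil
    (by rw [show spineF PyForest.nil = 0 from rfl]; exact hpre)
  rw [show flatF PyForest.nil 1 = [] from rfl, List.nil_append] at hflat
  have hparse : parse_header header.toList = some F := by rw [parse_header_eq]; exact hfold
  have hitems : altItems header.toList = itemsOf (PySem.Chars.splitOn header.toList ['\n']) :=
    altItems_eq header.toList
  obtain ⟨hc1, hc2, hc3, hc4⟩ :=
    traverseF_spec F 0 PySem.Dict.empty 0 PySem.Dict.nodup_keys_empty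
  set rows := (traverseF F 0 PySem.Dict.empty 0).2 with hrows
  have hbucket : ∀ r, rows.getD r [] =
      cellsAt (r + 1) (itemsOf (PySem.Chars.splitOn header.toList ['\n'])) := by
    intro r
    rw [hc2 r, ← hflat]
    simp [PySem.Dict.getD_empty]
  have hkeys : rows.keys.toFinset = Finset.range (heightF F) := by
    rw [hc4]
    ext x
    simp [PySem.Dict.keys_empty, Finset.mem_Ico, Finset.mem_range]
  have hsize : rows.size = heightF F := by
    have h1 : rows.keys.length = rows.size := by
      simp [PySem.Dict.keys, PySem.Dict.size]
    have h2 : rows.keys.toFinset.card = rows.keys.length := List.toFinset_card_of_nodup hc3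
    rw [hkeys, Finset.card_range] at h2
    omega
  by_cases hempty : itemsOf (PySem.Chars.splitOn header.toList ['\n']) = []
  · -- no outline lines: both sides return ""
    have hFnil : F = .nil := by
      rw [hempty] at hflat
      exact (flatF_eq_nil_iff F 1).mp hflat
    subst hFnil
    unfold table_header
    rw [hparse]
    unfold table_header_alt
    rw [hitems, hempty]
    rw [if_pos (by simp)]
    rfl
  · have hFne : F ≠ .nil := by
      intro hF
      rw [hF, show flatF PyForest.nil 1 = [] from rfl] at hflat
      exact hempty hflat.symm
    have hpos : 1 ≤ heightF F := heightF_pos F hFne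
    have hrcB : (itemsOf (PySem.Chars.splitOn header.toList ['\n'])).foldl
        (fun m it => if m < it.2 then it.2 else m) 0 = heightF F := by
      rw [← hflat, mf_flatF F 1 0 (by omega) hFne]
      omega
    have hem_pos := itemsOf_pos (PySem.Chars.splitOn header.toList ['\n'])
    -- A's output list is the flattened row groups
    unfold table_header
    rw [hparse]
    simp only [← hrows]
    rw [foldl_body_eq rows.size prefix_columns postfix_columns rows,
      PySem.List.foldl_append_eq_flatMap, List.nil_append, hsize]
    -- B's side
    unfold table_header_alt
    rw [hitems]
    rw [if_neg (by simp [hempty])]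
    rw [hrcB]
    have hlen : (List.replicate (heightF F) ([] : List (List Char × Nat × Bool))).length =
        heightF F := by simp
    have hBbucket : ∀ r, r < heightF F →
        (bLoop (itemsOf (PySem.Chars.splitOn header.toList ['\n']))
          (List.replicate (heightF F) [])).getD r [] =
        cellsAt (r + 1) (itemsOf (PySem.Chars.splitOn header.toList ['\n'])) := by
      intro r hr
      rw [bLoop_getD _ _ r (by rw [hlen]; exact hr) hem_pos,
        List.getD_replicate _ hr, List.nil_append]
    -- A's flattened output is the join-of-joins of the same row groups
    have hAjoin : PySem.Chars.join ['\n'] (List.flatMap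
        (fun r => rowGroup (heightF F) prefix_columns postfix_columns (rows.getD r []) r)
        (List.range (heightF F))) =
      PySem.Chars.join ['\n'] ((List.range (heightF F)).map (fun r =>
        PySem.Chars.join ['\n'] (rowGroup (heightF F) prefix_columns postfix_columns
          (rows.getD r []) r))) := by
      rw [List.flatMap_def,
        ← join_flatten ['\n'] _ (by
          intro g hg
          rw [List.mem_map] at hg
          obtain ⟨r, _, hgr⟩ := hg
          rw [← hgr]
          simp [rowGroup]),
        List.map_map]
      rfl
    rw [hAjoin]
    congr 1
    congr 1
    apply List.map_congr_left
    intro r hr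
    rw [List.mem_range] at hr
    congr 1
    rw [hBbucket r hr, hbucket r]
    simp [rowGroup, List.append_assoc]

-- ===== VERDICT (by name: the statement is the Claim_ definition above) =====
theorem table_header_spec : Claim_equal_table_header := by
  intro header pre post _ hpre
  exact table_header_agree header pre post hpre
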